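-- pv_equiv track=rewrite | github.com/tgbugs/heatmaps | visualization.py | applyCollapse
-- ===== SOURCE A (Python) =====
-- from collections import defaultdict
--
-- def applyCollapse(heatmap_data, key_collections_dict, term_axis=False):
--     """
--         NOTE: keys not mapped will be DROPPED
--         key_collections dict should have keys that are the values to be collapsed to
--         given the heatmap data and an ordered list of key collections (so you can pair them up with
--         the key you want them to converge to) collapse (sum) the data in each key collection
--         note that the keys in the key collections must match those (and should probably come from)
--         the keys in heatmap_data
--     """
--     #FIXME inefficient for single terms with no collapse
--     output = {}
--     if term_axis:
--         for new_term, collection in key_collections_dict.items():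
--             new_term_counts = defaultdict(lambda :0)
--             for term in collection:
--                 counts_dict = heatmap_data[term].items()
--                 for source, count in counts_dict:
--                     new_term_counts[source] += count
--             output[new_term] = dict(new_term_counts)
--     else:  # default to collapse sources (the inner collection)
--         for term, counts_dict in heatmap_data.items():
--             new_counts_dict = defaultdict(lambda :0)
--             for new_source, collection in key_collections_dict.items():
--                 for source in collection:
--                     if source in counts_dict:
--                         new_counts_dict[new_source] += counts_dict[source]
--             output[term] = dict(new_counts_dict)
--
--     return output
-- ===== SOURCE B (Python) =====
-- def applyCollapse(heatmap_data, key_collections_dict, term_axis=False):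
--     """Same collapse via a precomputed source->new_source reverse index: each term's
--     actual counts are walked once instead of rescanning every collection per term;
--     the term_axis branch flattens each collection's count items into one stream
--     folded once with get/assign."""
--     if term_axis:
--         return {new_term: _accumulate(p
--                                       for term in collection
--                                       for p in heatmap_data[term].items())
--                 for new_term, collection in key_collections_dict.items()}
--     reverse_index = {}
--     for new_source, collection in key_collections_dict.items():
--         for source in collection:
--             reverse_index.setdefault(source, []).append(new_source)
--     return {term: _collapse_counts(counts, reverse_index, key_collections_dict)
--             for term, counts in heatmap_data.items()}
--
--
-- def _accumulate(pairs):
--     acc = {}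
--     for source, count in pairs:
--         acc[source] = acc.get(source, 0) + count
--     return acc
--
--
-- def _collapse_counts(counts, reverse_index, key_collections_dict):
--     acc = {}
--     for source, count in counts.items():
--         for new_source in reverse_index.get(source, ()):
--             acc[new_source] = acc.get(new_source, 0) + count
--     return {new_source: acc[new_source]
--             for new_source in key_collections_dict if new_source in acc}
-- ===== Notes on version B (the rewrite author's own statement) =====
-- stated objective: faster
-- what changed: B precomputes a source->new_source reverse index and walks each term's actual counts once (plus one pass over the bucket names to emit in collection order), instead of A's rescan of every collection for every term; the term_axis branch flattens each collection's count items into one stream folded once with get/assign instead of nested defaultdict loops.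
import Mathlib
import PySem

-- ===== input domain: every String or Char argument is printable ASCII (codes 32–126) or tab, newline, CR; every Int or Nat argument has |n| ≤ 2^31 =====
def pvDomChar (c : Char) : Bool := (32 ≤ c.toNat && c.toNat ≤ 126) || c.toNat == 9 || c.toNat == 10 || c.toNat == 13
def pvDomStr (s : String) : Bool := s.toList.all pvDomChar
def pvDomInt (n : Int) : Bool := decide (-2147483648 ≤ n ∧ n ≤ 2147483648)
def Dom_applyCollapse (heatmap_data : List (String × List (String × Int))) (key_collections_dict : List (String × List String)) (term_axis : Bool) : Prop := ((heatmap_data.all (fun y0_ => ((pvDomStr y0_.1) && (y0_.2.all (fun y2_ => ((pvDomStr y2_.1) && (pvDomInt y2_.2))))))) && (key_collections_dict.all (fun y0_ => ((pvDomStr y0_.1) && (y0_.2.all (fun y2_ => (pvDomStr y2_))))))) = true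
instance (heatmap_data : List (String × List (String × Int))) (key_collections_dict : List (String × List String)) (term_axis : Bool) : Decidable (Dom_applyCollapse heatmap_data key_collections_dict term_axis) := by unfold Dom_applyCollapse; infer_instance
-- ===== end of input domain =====

-- B precomputes a source→new_source reverse index so each term's actual counts are walked once
-- instead of rescanning every collection per term (objective: faster).


-- ===== PORT A =====
def applyCollapse (heatmap_data : List (String × List (String × Int))) (key_collections_dict : List (String × List String)) (term_axis : Bool) : List (String × List (String × Int)) :=
  let hm : PySem.Dict String (PySem.Dict String Int) :=
    PySem.Dict.ofList (heatmap_data.map (fun p => (p.1, PySem.Dict.ofList p.2)))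
  let kc : PySem.Dict String (List String) := PySem.Dict.ofList key_collections_dict
  if term_axis then
    (kc.items.foldl (fun out p =>
        let ntc := p.2.foldl (fun ntc term =>
            match hm.get? term with
            | some counts_dict => counts_dict.items.foldl (fun a q => a.modify q.1 0 (· + q.2)) ntc
            | none => ntc  -- Python raises KeyError here; such inputs are excluded by Pre_
          ) (PySem.Dict.empty : PySem.Dict String Int)
        out.insert p.1 ntc.items)
      (PySem.Dict.empty : PySem.Dict String (List (String × Int)))).items
  else
    (hm.items.foldl (fun out p =>
        let ncd := kc.items.foldl (fun ncd q =>
            q.2.foldl (fun ncd source =>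
                if p.2.contains source then ncd.modify q.1 0 (· + p.2.getD source 0) else ncd)
              ncd)
          (PySem.Dict.empty : PySem.Dict String Int)
        out.insert p.1 ncd.items)
      (PySem.Dict.empty : PySem.Dict String (List (String × Int)))).items

-- ===== PORT B =====
-- helper _accumulate: fold the flattened pair stream once with get/assign
def bAccumulate (pairs : List (String × Int)) : PySem.Dict String Int :=
  pairs.foldl (fun acc q => acc.insert q.1 (acc.getD q.1 0 + q.2)) PySem.Dict.empty

-- helper _collapse_counts: walk the term's counts once through the reverse index,
-- then emit the touched buckets in key_collections order
def bCollapseCounts (counts : PySem.Dict String Int) (rev : PySem.Dict String (List String))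
    (kc : PySem.Dict String (List String)) : List (String × Int) :=
  let acc : PySem.Dict String Int :=
    counts.items.foldl (fun a c =>
      (rev.getD c.1 []).foldl (fun a ns => a.insert ns (a.getD ns 0 + c.2)) a)
      PySem.Dict.empty
  (kc.keys.filter (fun ns => acc.contains ns)).map (fun ns => (ns, acc.getD ns 0))

def applyCollapse_alt (heatmap_data : List (String × List (String × Int))) (key_collections_dict : List (String × List String)) (term_axis : Bool) : List (String × List (String × Int)) :=
  let hm : PySem.Dict String (PySem.Dict String Int) :=
    PySem.Dict.ofList (heatmap_data.map (fun p => (p.1, PySem.Dict.ofList p.2)))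
  let kc : PySem.Dict String (List String) := PySem.Dict.ofList key_collections_dict
  if term_axis then
    -- {nt: _accumulate(p for t in coll for p in heatmap_data[t].items()) ...}
    -- (heatmap_data[t] raises KeyError for a missing t, excluded by Pre_; getD's default is unreachable there)
    kc.items.map (fun q =>
      (q.1, (bAccumulate (q.2.flatMap (fun term => (hm.getD term PySem.Dict.empty).items))).items))
  else
    -- reverse_index: rev.setdefault(source, []).append(new_source) = modify with list append
    let rev : PySem.Dict String (List String) :=
      kc.items.foldl (fun r q => q.2.foldl (fun r source => r.modify source [] (· ++ [q.1])) r)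
        PySem.Dict.empty
    hm.items.map (fun p => (p.1, bCollapseCounts p.2 rev kc))

-- ===== PRECONDITION & SPEC =====
-- Pre_ excludes exactly the inputs where Python A raises KeyError: term_axis set with some
-- collection naming a term that is not a key of heatmap_data (B raises there too).
def Pre_applyCollapse (heatmap_data : List (String × List (String × Int))) (key_collections_dict : List (String × List String)) (term_axis : Bool) : Prop :=
  term_axis = true → ∀ p ∈ key_collections_dict, ∀ t ∈ p.2, t ∈ heatmap_data.map (fun y => y.1)
instance (heatmap_data : List (String × List (String × Int))) (key_collections_dict : List (String × List String)) (term_axis : Bool) : Decidable (Pre_applyCollapse heatmap_data key_collections_dict term_axis) := by unfold Pre_applyCollapse; infer_instance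
def pvWitness_applyCollapse : (List (String × List (String × Int))) × (List (String × List String)) × Bool :=
  ([("t1", [("s1", 2), ("s2", 3)]), ("t2", [("s1", 1)])], [("n1", ["t1", "t2"])], true)
def Spec_applyCollapse (heatmap_data : List (String × List (String × Int))) (key_collections_dict : List (String × List String)) (term_axis : Bool) (out : List (String × List (String × Int))) : Prop := out = applyCollapse_alt heatmap_data key_collections_dict term_axis
instance (heatmap_data : List (String × List (String × Int))) (key_collections_dict : List (String × List String)) (term_axis : Bool) (out : List (String × List (String × Int))) : Decidable (Spec_applyCollapse heatmap_data key_collections_dict term_axis out) := by unfold Spec_applyCollapse; infer_instance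

-- ===== CLAIM (what is proved, stated in full; the proofs are below) =====
def Claim_equal_applyCollapse : Prop := ∀ (heatmap_data : List (String × List (String × Int))) (key_collections_dict : List (String × List String)) (term_axis : Bool), Dom_applyCollapse heatmap_data key_collections_dict term_axis → Pre_applyCollapse heatmap_data key_collections_dict term_axis → Spec_applyCollapse heatmap_data key_collections_dict term_axis (applyCollapse heatmap_data key_collections_dict term_axis)

-- ===== LEMMAS AND PROOFS =====

-- the sum of the values of an association list at one key
def keyedSum (cs : List (String × Int)) (s : String) : Int :=
  ((cs.filter (fun c => c.1 == s)).map (fun c => c.2)).sum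

lemma keyedSum_nil (s : String) : keyedSum [] s = 0 := rfl

lemma keyedSum_cons (c : String × Int) (cs : List (String × Int)) (s : String) :
    keyedSum (c :: cs) s = (if c.1 = s then c.2 else 0) + keyedSum cs s := by
  by_cases h : c.1 = s
  · simp [keyedSum, h]
  · simp [keyedSum, h]

lemma sum_map_ite_eq (L : List String) (a : String) (v : Int) :
    (L.map (fun s => if a = s then v else 0)).sum = v * (L.count a : Int) := by
  induction L with
  | nil => simp
  | cons s L ih =>
    by_cases h : a = s
    · simp only [List.map_cons, List.sum_cons, if_pos h, ih, List.count_cons,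
        show (s == a) = true by simp [h.symm]]
      push_cast
      ring
    · simp only [List.map_cons, List.sum_cons, if_neg h, ih, List.count_cons,
        show (s == a) = false by simp [Ne.symm h]]
      push_cast
      ring

-- double counting: summing buckets over the keys of L equals summing each item times its multiplicity
lemma sum_keyedSum_exchange (cs : List (String × Int)) (L : List String) :
    (L.map (keyedSum cs)).sum = (cs.map (fun c => c.2 * (L.count c.1 : Int))).sum := by
  induction cs with
  | nil =>
    rw [List.map_congr_left (fun s _ => keyedSum_nil s)]
    simp
  | cons c cs ih =>
    have : L.map (keyedSum (c :: cs))
        = L.map (fun s => (if c.1 = s then c.2 else 0) + keyedSum cs s) :=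
      List.map_congr_left (fun s _ => keyedSum_cons c cs s)
    rw [this, PySem.List.sum_map_add_int, sum_map_ite_eq, ih, List.map_cons, List.sum_cons]

lemma filter_key_nil (l : List (String × Int)) (s : String)
    (h : s ∉ l.map (fun c => c.1)) : l.filter (fun c => c.1 == s) = [] := by
  rw [List.filter_eq_nil_iff]
  intro c hc hcs
  exact h (List.mem_map.2 ⟨c, hc, by simpa using hcs⟩)

lemma filter_key_single (l : List (String × Int)) (hnd : (l.map (fun c => c.1)).Nodup)
    (c : String × Int) (hc : c ∈ l) : l.filter (fun x => x.1 == c.1) = [c] := by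
  induction l with
  | nil => cases hc
  | cons h l ih =>
    rw [List.map_cons, List.nodup_cons] at hnd
    rcases List.mem_cons.1 hc with rfl | hc'
    · rw [List.filter_cons, if_pos (by simp)]
      rw [filter_key_nil l c.1 hnd.1]
    · have hne : (h.1 == c.1) = false := by
        simp only [beq_eq_false_iff_ne, ne_eq]
        intro he
        exact hnd.1 (he ▸ List.mem_map.2 ⟨c, hc', rfl⟩)
      rw [List.filter_cons, if_neg (by simp [hne]), ih hnd.2 hc']

-- keyedSum over a dict's items is its guarded lookup
lemma keyedSum_of_dict (d : PySem.Dict String Int) (hnd : d.keys.Nodup) (s : String) :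
    keyedSum d.items s = if d.contains s then d.getD s 0 else 0 := by
  by_cases hc : d.contains s = true
  · rw [if_pos hc]
    have hs : s ∈ d.items.map (fun c => c.1) := (PySem.Dict.contains_iff_mem_keys d s).1 hc
    rcases List.mem_map.1 hs with ⟨c, hcmem, hcs⟩
    subst hcs
    have hfil : d.items.filter (fun x => x.1 == c.1) = [c] := filter_key_single d.items hnd c hcmem
    unfold keyedSum
    rw [hfil, List.map_cons, List.map_nil, List.sum_cons, List.sum_nil, add_zero]
    have : (c.1, c.2) ∈ d.items := by simpa using hcmem
    rw [PySem.Dict.getD_of_mem_items d this hnd 0]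
  · rw [if_neg hc]
    have hs : s ∉ d.items.map (fun c => c.1) := by
      intro hmem
      exact hc ((PySem.Dict.contains_iff_mem_keys d s).2 hmem)
    unfold keyedSum
    rw [filter_key_nil d.items s hs]
    rfl

lemma sum_filter_map (L : List String) (p : String → Bool) (f : String → Int) :
    ((L.filter p).map f).sum = (L.map (fun s => if p s then f s else 0)).sum := by
  induction L with
  | nil => simp
  | cons s L ih =>
    by_cases h : p s = true
    · simp [h, ih]
    · simp [h, ih]

-- get/assign accumulation loop: lookups read the keyed sum
lemma getD_addloop (l : List (String × Int)) :
    ∀ (a : PySem.Dict String Int) (k : String),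
      (l.foldl (fun a p => a.insert p.1 (a.getD p.1 0 + p.2)) a).getD k 0
      = a.getD k 0 + keyedSum l k := by
  induction l with
  | nil => intro a k; simp [keyedSum_nil]
  | cons p l ih =>
    intro a k
    rw [List.foldl_cons, ih, keyedSum_cons, PySem.Dict.getD_insert]
    by_cases h : k = p.1
    · rw [if_pos h, if_pos h.symm, add_assoc, h]
    · rw [if_neg h, if_neg (fun he => h he.symm), zero_add]

lemma contains_addloop (l : List (String × Int)) :
    ∀ (a : PySem.Dict String Int) (k : String),
      (l.foldl (fun a p => a.insert p.1 (a.getD p.1 0 + p.2)) a).contains k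
      = (a.contains k || l.any (fun p => p.1 == k)) := by
  induction l with
  | nil => intro a k; simp
  | cons p l ih =>
    intro a k
    rw [List.foldl_cons, ih, PySem.Dict.contains_insert, List.any_cons]
    cases h : a.contains k <;> cases h2 : (p.1 == k) <;>
      simp [BEq.comm (a := k) (b := p.1), h2]

-- multiplicity of a bucket name in the flattened reverse-index stream
lemma count_RL (kcl : List (String × List String)) :
    (kcl.map (fun q => q.1)).Nodup → ∀ q ∈ kcl, ∀ s : String,
      ((kcl.flatMap (fun q' => (q'.2.filter (fun s' => s' == s)).map (fun _ => q'.1))).count q.1)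
      = q.2.count s := by
  induction kcl with
  | nil => intro _ q hq; cases hq
  | cons q'' kcl ih =>
    intro hnd q hq s
    rw [List.map_cons, List.nodup_cons] at hnd
    rw [List.flatMap_cons, List.count_append, List.map_const', List.count_replicate]
    rcases List.mem_cons.1 hq with rfl | hq'
    · have hzero : (kcl.flatMap (fun q' => (q'.2.filter (fun s' => s' == s)).map (fun _ => q'.1))).count q.1 = 0 := by
        rw [List.count_eq_zero]
        intro hmem
        rcases List.mem_flatMap.1 hmem with ⟨q', hq', hmem'⟩
        rcases List.mem_map.1 hmem' with ⟨_, _, he⟩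
        exact hnd.1 (he ▸ List.mem_map.2 ⟨q', hq', rfl⟩)
      rw [hzero, if_pos (by simp), List.count_eq_length_filter, add_zero]
    · have hne : (q''.1 == q.1) = false := by
        simp only [beq_eq_false_iff_ne, ne_eq]
        intro he
        exact hnd.1 (he ▸ List.mem_map.2 ⟨q, hq', rfl⟩)
      rw [if_neg (by simp [hne]), ih hnd.2 q hq' s, zero_add]

-- every item of dict(l) is an element of l (first-occurrence position, last-occurrence value)
lemma mem_items_ofList {κ ν : Type} [BEq κ] [LawfulBEq κ] (l : List (κ × ν)) (q : κ × ν)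
    (h : q ∈ (PySem.Dict.ofList l).items) : q ∈ l := by
  suffices H : ∀ (l : List (κ × ν)) (d : PySem.Dict κ ν), ∀ q ∈ (l.foldl (fun d p => d.insert p.1 p.2) d).items, q ∈ d.items ∨ q ∈ l by
    rcases H l PySem.Dict.empty q h with h' | h'
    · simp [PySem.Dict.empty] at h'
    · exact h'
  intro l
  induction l with
  | nil => intro d q hq; exact Or.inl hq
  | cons p l ih =>
    intro d q hq
    rcases ih (d.insert p.1 p.2) q hq with h' | h'
    · rcases (PySem.Dict.mem_items_insert _ _ _ _).1 h' with h'' | h''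
      · simp [h'']
      · exact Or.inl h''.1
    · simp [h']

-- membership in the keys of dict(l) is membership in the key column of l
lemma contains_ofList_keycol {ν : Type} (l : List (String × ν)) (t : String) :
    (PySem.Dict.ofList l).contains t = true ↔ t ∈ l.map (fun y => y.1) := by
  rw [PySem.Dict.contains_iff_mem_keys]
  show t ∈ (List.foldl (fun d p => d.insert p.1 p.2) PySem.Dict.empty l).keys ↔ _
  rw [PySem.Dict.keys_foldl_insert_key l (fun p => p.1) (fun _ p => p.2)]
  have : (PySem.Dict.empty : PySem.Dict String ν).keys = [] := rfl
  rw [this, PySem.Set.update_nil_left, PySem.Set.mem_ofList]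

-- A's guarded inner source loop at a fixed bucket key equals one guarded modify by the direct sum
lemma inner_source_loop (cd : PySem.Dict String Int) (k : String) (coll : List String) :
    ∀ d : PySem.Dict String Int,
      coll.foldl (fun d s => if cd.contains s then d.modify k 0 (· + cd.getD s 0) else d) d
      = if coll.any (fun s => cd.contains s) then
          d.modify k 0 (· + ((coll.filter (fun s => cd.contains s)).map (fun s => cd.getD s 0)).sum)
        else d := by
  induction coll with
  | nil => intro d; simp
  | cons s coll ih =>
    intro d
    by_cases h : cd.contains s = true
    · rw [List.foldl_cons, if_pos h, ih]
      have hany : ((s :: coll).any fun s => cd.contains s) = true := by simp [h]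
      rw [if_pos hany]
      have hfil : (s :: coll).filter (fun s => cd.contains s)
          = s :: coll.filter (fun s => cd.contains s) := by simp [h]
      rw [hfil, List.map_cons, List.sum_cons]
      by_cases h2 : (coll.any fun s => cd.contains s) = true
      · rw [if_pos h2]
        simp only [PySem.Dict.modify, PySem.Dict.getD_insert_self,
          PySem.Dict.insert_insert_self, add_assoc]
      · rw [if_neg h2]
        have hfil2 : coll.filter (fun s => cd.contains s) = [] := by
          rw [List.filter_eq_nil_iff]
          intro x hx hc
          exact h2 (List.any_eq_true.2 ⟨x, hx, hc⟩)
        rw [hfil2]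
        simp
    · have h' : cd.contains s = false := by simpa using h
      rw [List.foldl_cons, if_neg (by simp [h']), ih]
      have : ((s :: coll).any fun s => cd.contains s) = (coll.any fun s => cd.contains s) := by
        simp [h']
      rw [this]
      have : (s :: coll).filter (fun s => cd.contains s)
          = coll.filter (fun s => cd.contains s) := by simp [h']
      rw [this]

-- a fold of guarded modifies over pairwise-distinct fresh keys appends the filtered buckets
lemma outer_bucket_loop (C : String × List String → Bool) (v : String × List String → Int) :
    ∀ (l : List (String × List String)) (d : PySem.Dict String Int),
      (∀ q ∈ l, d.contains q.1 = false) → (l.map (fun q => q.1)).Nodup →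
      (l.foldl (fun d q => if C q then d.modify q.1 0 (fun x => x + v q) else d) d).items
      = d.items ++ (l.filter C).map (fun q => (q.1, v q)) := by
  intro l
  induction l with
  | nil => intro d _ _; simp
  | cons q l ih =>
    intro d hfresh hnd
    simp only [List.map_cons, List.nodup_cons] at hnd
    by_cases hC : C q = true
    · have hf : d.contains q.1 = false := hfresh q (by simp)
      have hstep : d.modify q.1 0 (fun x => x + v q) = d.insert q.1 (v q) := by
        simp [PySem.Dict.modify, PySem.Dict.getD_of_not_contains d 0 hf]
      have hfresh' : ∀ r ∈ l, (d.insert q.1 (v q)).contains r.1 = false := by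
        intro r hr
        rw [PySem.Dict.contains_insert]
        have : (r.1 == q.1) = false := by
          simp only [beq_eq_false_iff_ne, ne_eq]
          intro hr1
          exact hnd.1 (hr1 ▸ List.mem_map_of_mem hr)
        simp [this, hfresh r (List.mem_cons_of_mem _ hr)]
      rw [List.foldl_cons, if_pos hC, hstep, ih _ hfresh' hnd.2,
        PySem.Dict.items_insert_of_not_contains d (v q) hf]
      simp [hC]
    · have hC' : C q = false := by simpa using hC
      rw [List.foldl_cons, if_neg (by simp [hC']),
        ih _ (fun r hr => hfresh r (List.mem_cons_of_mem _ hr)) hnd.2]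
      simp [hC']

-- keys of dict(l).items form a Nodup list (stated on the items' key column)
lemma nodup_items_keycol {κ ν : Type} [BEq κ] [LawfulBEq κ] (l : List (κ × ν)) :
    ((PySem.Dict.ofList l).items.map (fun p => p.1)).Nodup :=
  PySem.Dict.nodup_keys_ofList l

-- the reverse index looked up at s lists, in collection order, each bucket name once per
-- occurrence of s in its collection
lemma revIndex_getD (kc : PySem.Dict String (List String)) (s : String) :
    (kc.items.foldl (fun r q => q.2.foldl (fun r source => r.modify source [] (· ++ [q.1])) r)
        (PySem.Dict.empty : PySem.Dict String (List String))).getD s []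
    = kc.items.flatMap (fun q => (q.2.filter (fun s' => s' == s)).map (fun _ => q.1)) := by
  rw [PySem.List.foldl_congr_mem kc.items _
    (fun r q => (q.2.map (fun s' => (s', q.1))).foldl (fun r pr => r.modify pr.1 [] (· ++ [pr.2])) r)
    PySem.Dict.empty (by intro acc q _; beta_reduce; exact (List.foldl_map (f := fun s' => (s', q.1)) (g := fun (r : PySem.Dict String (List String)) (pr : String × String) => r.modify pr.1 [] (· ++ [pr.2]))).symm)]
  rw [← List.foldl_flatMap, PySem.Dict.getD_foldl_modify_append, PySem.Dict.getD_empty,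
    List.nil_append, List.filter_flatMap, List.map_flatMap]
  congr 1
  funext q
  rw [List.filter_map, List.map_map]
  rfl

-- the core exchange: B's reverse-index accumulation agrees bucket by bucket with A's rescan
lemma collapse_counts_eq (kc : PySem.Dict String (List String)) (cd : PySem.Dict String Int)
    (hkc : kc.keys.Nodup) (hcd : cd.keys.Nodup) :
    bCollapseCounts cd
      (kc.items.foldl (fun r q => q.2.foldl (fun r source => r.modify source [] (· ++ [q.1])) r)
        PySem.Dict.empty) kc
    = (kc.items.filter (fun q => q.2.any (fun s => cd.contains s))).map
        (fun q => (q.1, ((q.2.filter (fun s => cd.contains s)).map (fun s => cd.getD s 0)).sum)) := by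
  set rev := kc.items.foldl (fun r q => q.2.foldl (fun r source => r.modify source [] (· ++ [q.1])) r)
      (PySem.Dict.empty : PySem.Dict String (List String)) with hrev
  -- flatten B's accumulation into one pair stream
  have hacc : cd.items.foldl (fun a c =>
        (rev.getD c.1 []).foldl (fun a ns => a.insert ns (a.getD ns 0 + c.2)) a)
        (PySem.Dict.empty : PySem.Dict String Int)
      = (cd.items.flatMap (fun c => (rev.getD c.1 []).map (fun ns => (ns, c.2)))).foldl
          (fun a p => a.insert p.1 (a.getD p.1 0 + p.2)) PySem.Dict.empty := by
    rw [PySem.List.foldl_congr_mem cd.items _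
      (fun a c => ((rev.getD c.1 []).map (fun ns => (ns, c.2))).foldl
        (fun a p => a.insert p.1 (a.getD p.1 0 + p.2)) a)
      PySem.Dict.empty (by intro acc c _; beta_reduce; exact (List.foldl_map (f := fun ns => (ns, c.2)) (g := fun (a : PySem.Dict String Int) (p : String × Int) => a.insert p.1 (a.getD p.1 0 + p.2))).symm)]
    rw [← List.foldl_flatMap]
  set FP := cd.items.flatMap (fun c => (rev.getD c.1 []).map (fun ns => (ns, c.2))) with hFP
  -- per-bucket membership
  have hconts : ∀ q ∈ kc.items,
      (FP.foldl (fun a p => a.insert p.1 (a.getD p.1 0 + p.2)) PySem.Dict.empty).contains q.1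
      = q.2.any (fun s => cd.contains s) := by
    intro q hq
    rw [contains_addloop, PySem.Dict.contains_empty, Bool.false_or, Bool.eq_iff_iff,
      List.any_eq_true, List.any_eq_true]
    constructor
    · rintro ⟨p, hp, hpk⟩
      rcases List.mem_flatMap.1 hp with ⟨c, hc, hpmem⟩
      rcases List.mem_map.1 hpmem with ⟨ns, hns, rfl⟩
      have hns' : q.1 ∈ rev.getD c.1 [] := by simpa using (beq_iff_eq.1 hpk) ▸ hns
      rw [hrev, revIndex_getD kc c.1] at hns'
      have hcount : 0 < q.2.count c.1 := by
        rw [← count_RL kc.items hkc q hq c.1]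
        exact List.count_pos_iff.2 hns'
      refine ⟨c.1, List.count_pos_iff.1 hcount, ?_⟩
      exact (PySem.Dict.contains_iff_mem_keys cd c.1).2 (List.mem_map.2 ⟨c, hc, rfl⟩)
    · rintro ⟨s, hs, hcont⟩
      rcases List.mem_map.1 ((PySem.Dict.contains_iff_mem_keys cd s).1 hcont) with ⟨c, hc, rfl⟩
      refine ⟨(q.1, c.2), List.mem_flatMap.2 ⟨c, hc, List.mem_map.2 ⟨q.1, ?_, rfl⟩⟩, by simp⟩
      rw [hrev, revIndex_getD kc c.1]
      rw [← List.count_pos_iff, count_RL kc.items hkc q hq c.1]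
      exact List.count_pos_iff.2 hs
  -- per-bucket value
  have hval : ∀ q ∈ kc.items,
      (FP.foldl (fun a p => a.insert p.1 (a.getD p.1 0 + p.2)) PySem.Dict.empty).getD q.1 0
      = ((q.2.filter (fun s => cd.contains s)).map (fun s => cd.getD s 0)).sum := by
    intro q hq
    rw [getD_addloop, PySem.Dict.getD_empty, zero_add]
    -- B side: keyedSum of the flattened stream = Σ_c c.2 * (multiplicity of c.1 in q.2)
    have hB : keyedSum FP q.1 = (cd.items.map (fun c => c.2 * (q.2.count c.1 : Int))).sum := by
      unfold keyedSum
      rw [hFP, List.filter_flatMap, List.map_flatMap]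
      have : ∀ c ∈ cd.items,
          (((rev.getD c.1 []).map (fun ns => (ns, c.2))).filter (fun pr => pr.1 == q.1)).map (fun c => c.2)
          = List.replicate (q.2.count c.1) c.2 := by
        intro c _
        rw [List.filter_map, List.map_map]
        have hcmp : (((rev.getD c.1 []).filter ((fun (pr : String × Int) => pr.1 == q.1) ∘ (fun ns => (ns, c.2)))).map
              ((fun (c : String × Int) => c.2) ∘ (fun ns => (ns, c.2))))
            = ((rev.getD c.1 []).filter (fun ns => ns == q.1)).map (fun _ => c.2) := rfl
        rw [hcmp, List.map_const', ← List.count_eq_length_filter]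
        rw [hrev, revIndex_getD kc c.1, count_RL kc.items hkc q hq c.1]
      calc (cd.items.flatMap (fun c =>
              (((rev.getD c.1 []).map (fun ns => (ns, c.2))).filter (fun pr => pr.1 == q.1)).map (fun c => c.2))).sum
          = (cd.items.flatMap (fun c => List.replicate (q.2.count c.1) c.2)).sum := by
            rw [List.flatMap_def, List.flatMap_def, List.map_congr_left this]
        _ = (cd.items.map (fun c => c.2 * (q.2.count c.1 : Int))).sum := by
            rw [List.flatMap_def, List.sum_flatten, List.map_map]
            congr 1
            apply List.map_congr_left
            intro c _
            simp [Function.comp, List.sum_replicate, mul_comm]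
    rw [hB, sum_filter_map]
    rw [List.map_congr_left (fun s _ => (keyedSum_of_dict cd hcd s).symm)]
    rw [sum_keyedSum_exchange]
  -- assemble: emit in key_collections order
  unfold bCollapseCounts
  simp only [hacc]
  have hkeys : kc.keys = kc.items.map (fun x => x.1) := rfl
  rw [hkeys, List.filter_map, List.map_map]
  have hfc : (kc.items.filter ((fun ns => (FP.foldl (fun a p => a.insert p.1 (a.getD p.1 0 + p.2)) PySem.Dict.empty).contains ns) ∘ fun x => x.1))
      = kc.items.filter (fun q => q.2.any fun s => cd.contains s) :=
    List.filter_congr (fun q hq => hconts q hq)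
  rw [hfc]
  apply List.map_congr_left
  intro q hq
  have hq' : q ∈ kc.items := (List.mem_filter.1 hq).1
  show (q.1, (FP.foldl (fun a p => a.insert p.1 (a.getD p.1 0 + p.2)) PySem.Dict.empty).getD q.1 0) = _
  rw [hval q hq']

-- ===== VERDICT (by name: the statement is the Claim_ definition above) =====
theorem applyCollapse_spec : Claim_equal_applyCollapse := by
  intro heatmap_data key_collections_dict term_axis _hdom hpre
  unfold Spec_applyCollapse applyCollapse applyCollapse_alt
  set hm : PySem.Dict String (PySem.Dict String Int) :=
    PySem.Dict.ofList (heatmap_data.map (fun p => (p.1, PySem.Dict.ofList p.2))) with hhm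
  set kc : PySem.Dict String (List String) := PySem.Dict.ofList key_collections_dict with hkc
  cases term_axis with
  | true =>
    rw [if_pos rfl]
    -- the outer fold inserts pairwise-distinct fresh keys: its items are a map over kc.items
    rw [PySem.Dict.items_foldl_insert_fresh kc.items (fun p => p.1)
      (fun p => ((p.2.foldl (fun ntc term =>
          match hm.get? term with
          | some counts_dict => counts_dict.items.foldl (fun a q => a.modify q.1 0 (· + q.2)) ntc
          | none => ntc) (PySem.Dict.empty : PySem.Dict String Int))).items)
      PySem.Dict.empty (by intro a _; rfl) (nodup_items_keycol key_collections_dict)]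
    have hie : (PySem.Dict.empty : PySem.Dict String (List (String × Int))).items = [] := rfl
    rw [hie, List.nil_append]
    apply List.map_congr_left
    intro p hp
    have hterms : ∀ t ∈ p.2, hm.contains t = true := by
      intro t ht
      exact (contains_ofList_keycol _ t).2 (by
        simpa using hpre rfl p (mem_items_ofList key_collections_dict p hp) t ht)
    congr 1
    -- replace the KeyError-guarded lookup by getD, then fold over the flattened stream
    rw [PySem.List.foldl_congr_mem p.2 _
      (fun ntc term => ((hm.getD term PySem.Dict.empty).items).foldl
        (fun a q => a.modify q.1 0 (· + q.2)) ntc) PySem.Dict.empty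
      (by
        intro acc t ht
        have := hterms t ht
        rw [PySem.Dict.contains_eq_isSome_get?] at this
        rcases Option.isSome_iff_exists.1 this with ⟨cd, hcd⟩
        simp only [hcd, PySem.Dict.getD_eq_get?_getD, Option.getD_some])]
    rw [← List.foldl_flatMap]
    rfl
  | false =>
    rw [if_neg Bool.false_ne_true, if_neg Bool.false_ne_true]
    rw [PySem.Dict.items_foldl_insert_fresh hm.items (fun p => p.1)
      (fun p => ((kc.items.foldl (fun ncd q =>
          q.2.foldl (fun ncd source =>
            if p.2.contains source then ncd.modify q.1 0 (· + p.2.getD source 0) else ncd) ncd)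
        (PySem.Dict.empty : PySem.Dict String Int))).items)
      PySem.Dict.empty (by intro a _; rfl)
      (nodup_items_keycol (heatmap_data.map (fun p => (p.1, PySem.Dict.ofList p.2))))]
    have hie : (PySem.Dict.empty : PySem.Dict String (List (String × Int))).items = [] := rfl
    rw [hie, List.nil_append]
    apply List.map_congr_left
    intro p hp
    have hcd : p.2.keys.Nodup := by
      rcases List.mem_map.1 (mem_items_ofList _ p hp) with ⟨r, _, hpr⟩
      have : p.2 = PySem.Dict.ofList r.2 := by rw [← hpr]
      rw [this]
      exact PySem.Dict.nodup_keys_ofList r.2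
    congr 1
    -- A side: the nested rescan is a filtered map of direct sums …
    rw [PySem.List.foldl_congr_mem kc.items _
      (fun ncd q => if q.2.any (fun s => p.2.contains s) then
          ncd.modify q.1 0 (fun x => x + ((q.2.filter (fun s => p.2.contains s)).map (fun s => p.2.getD s 0)).sum)
        else ncd) PySem.Dict.empty
      (by intro acc q _; exact inner_source_loop p.2 q.1 q.2 acc)]
    rw [outer_bucket_loop _ _ kc.items PySem.Dict.empty (by intro q _; rfl)
      (nodup_items_keycol key_collections_dict)]
    have hie2 : (PySem.Dict.empty : PySem.Dict String Int).items = [] := rfl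
    rw [hie2, List.nil_append]
    -- … which is exactly what B's reverse-index walk produces
    exact (collapse_counts_eq kc p.2 (PySem.Dict.nodup_keys_ofList key_collections_dict) hcd).symm
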